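-- pv_equiv track=rewrite | github.com/stschwark/advent-of-code-2018 | puzzle/day08.py | meta_from
-- ===== SOURCE A (Python) =====
-- def meta_from(values):
--     result = []
--
--     children = values.pop(0)
--     meta_entries = values.pop(0)
--
--     for _ in range(children):
--         result.extend(meta_from(values))
--
--     for _ in range(meta_entries):
--         result.append(values.pop(0))
--
--     return result
-- ===== SOURCE B (Python) =====
-- def meta_from(values):
--     result = []
--     stack = [[values.pop(0), values.pop(0)]]
--     while stack:
--         top = stack[-1]
--         if top[0] > 0:
--             top[0] -= 1
--             stack.append([values.pop(0), values.pop(0)])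
--         else:
--             for _ in range(top[1]):
--                 result.append(values.pop(0))
--             stack.pop()
--     return result
-- ===== Notes on version B (the rewrite author's own statement) =====
-- stated objective: alternative
-- what changed: Replaced A's recursive tree-walk with an explicit stack of (children_remaining, meta_count) frames in a single while loop that flushes a node's metadata when its children counter reaches zero; values is consumed left-to-right identically.
import Mathlib
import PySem

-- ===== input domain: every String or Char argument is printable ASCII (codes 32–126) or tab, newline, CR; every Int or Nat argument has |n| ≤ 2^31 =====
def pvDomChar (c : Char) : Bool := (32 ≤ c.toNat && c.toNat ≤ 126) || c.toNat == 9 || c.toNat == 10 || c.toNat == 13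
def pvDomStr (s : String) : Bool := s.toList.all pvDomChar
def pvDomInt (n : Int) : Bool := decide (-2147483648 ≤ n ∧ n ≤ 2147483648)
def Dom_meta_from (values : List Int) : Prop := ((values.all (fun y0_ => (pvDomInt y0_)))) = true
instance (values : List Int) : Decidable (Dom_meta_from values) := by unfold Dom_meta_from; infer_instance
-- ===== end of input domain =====

-- B replaces A's recursion by an explicit stack loop (same left-to-right consumption of
-- `values`); both Pythons mutate `values` in place identically (popping the consumed
-- prefix) — the equivalence proved here is about the RETURN value.

-- ===== PORT A =====
-- `for _ in range(n): result.append(values.pop(0))` — pops n front elements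
def popMany : Nat → List Int → Option (List Int × List Int)
  | 0, vs => some ([], vs)
  | _ + 1, [] => none
  | n + 1, a :: vs =>
    match popMany n vs with
    | none => none
    | some (r, rest) => some (a :: r, rest)

-- the recursion of A, with fuel making the partial recursion total (none = IndexError
-- or fuel exhausted; fuel `values.length + 1` is sufficient whenever Python A returns,
-- since each nesting level consumes at least two elements of `values` first)
mutual
  def metaA : Nat → List Int → Option (List Int × List Int)
    | 0, _ => none
    | _ + 1, [] => none
    | _ + 1, [_] => none
    | f + 1, c :: m :: vs =>
      match metaAKids f c.toNat vs with
      | none => none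
      | some (r, vs1) =>
        match popMany m.toNat vs1 with
        | none => none
        | some (metas, rest) => some (r ++ metas, rest)
  termination_by f _ => (f, 0)
  -- `for _ in range(children): result.extend(meta_from(values))`
  def metaAKids : Nat → Nat → List Int → Option (List Int × List Int)
    | _, 0, vs => some ([], vs)
    | f, n + 1, vs =>
      match metaA f vs with
      | none => none
      | some (r, vs2) =>
        match metaAKids f n vs2 with
        | none => none
        | some (r', rest) => some (r ++ r', rest)
  termination_by f n _ => (f, n + 1)
end

def meta_from (values : List Int) : List Int :=
  match metaA (values.length + 1) values with
  | some (r, _) => r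
  | none => []

-- ===== PORT B =====
-- the while-loop of B: stack of frames (children_remaining, meta_count); fuel makes the
-- loop total (none = IndexError or fuel exhausted; `values.length + 2` iterations suffice
-- whenever Python B returns)
def loopB : Nat → List Int → List (Int × Int) → List Int → Option (List Int)
  | _, _, [], res => some res
  | 0, _, _ :: _, _ => none
  | f + 1, vs, (c, m) :: st, res =>
    if 0 < c then
      match vs with
      | a :: b :: vs' => loopB f vs' ((a, b) :: (c - 1, m) :: st) res
      | _ => none
    else
      match popMany m.toNat vs with
      | none => none
      | some (metas, rest) => loopB f rest st (res ++ metas)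

def meta_from_alt (values : List Int) : List Int :=
  match values with
  | c :: m :: vs => (loopB (vs.length + 2) vs [(c, m)] []).getD []
  | _ => []

-- ===== PRECONDITION & SPEC =====
-- shape checker for Pre_: `values` starts with a well-formed node encoding
-- (header `c m`, then max(c,0) child encodings, then max(m,0) metadata entries);
-- returns the unconsumed suffix; fuel `values.length + 1` is always sufficient.
def chkKids (g : List Int → Option (List Int)) : Nat → List Int → Option (List Int)
  | 0, vs => some vs
  | n + 1, vs =>
    match g vs with
    | none => none
    | some vs2 => chkKids g n vs2

def chk : Nat → List Int → Option (List Int)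
  | 0, _ => none
  | f + 1, c :: m :: vs =>
    match chkKids (fun w => chk f w) c.toNat vs with
    | none => none
    | some vs' => if m.toNat ≤ vs'.length then some (vs'.drop m.toNat) else none
  | _ + 1, _ => none

-- Pre_: exactly the inputs on which Python A returns (elsewhere it raises IndexError)
def Pre_meta_from (values : List Int) : Prop :=
  (chk (values.length + 1) values).isSome = true
instance (values : List Int) : Decidable (Pre_meta_from values) := by
  unfold Pre_meta_from; infer_instance

def pvWitness_meta_from : List Int :=
  [2, 3, 0, 3, 10, 11, 12, 1, 1, 0, 1, 99, 2, 1, 1, 2]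

def Spec_meta_from (values : List Int) (out : List Int) : Prop := out = meta_from_alt values
instance (values : List Int) (out : List Int) : Decidable (Spec_meta_from values out) := by
  unfold Spec_meta_from; infer_instance

-- ===== CLAIM (what is proved, stated in full; the proofs are below) =====
def Claim_equal_meta_from : Prop :=
  ∀ (values : List Int), Dom_meta_from values → Pre_meta_from values →
    Spec_meta_from values (meta_from values)

-- ===== LEMMAS AND PROOFS =====

theorem popMany_len {n : Nat} {vs r rest : List Int}
    (h : popMany n vs = some (r, rest)) : rest.length + n = vs.length := by
  induction n generalizing vs r rest with
  | zero =>
    simp only [popMany, Option.some.injEq, Prod.mk.injEq] at h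
    obtain ⟨-, rfl⟩ := h
    omega
  | succ n ih =>
    match vs with
    | [] => simp [popMany] at h
    | a :: vs =>
      simp only [popMany] at h
      cases hp : popMany n vs with
      | none => simp [hp] at h
      | some p =>
        obtain ⟨r', rest'⟩ := p
        simp only [hp, Option.some.injEq, Prod.mk.injEq] at h
        have := ih hp
        rw [← h.2] at *
        simp only [List.length_cons]
        omega

theorem popMany_take_drop : ∀ (k : Nat) (w : List Int), k ≤ w.length →
    popMany k w = some (w.take k, w.drop k) := by
  intro k
  induction k with
  | zero => intro w _; simp [popMany]
  | succ k ih =>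
    intro w hw
    match w with
    | [] => simp at hw
    | a :: w' =>
      simp only [List.length_cons] at hw
      simp [popMany, ih w' (by omega)]

theorem metaAKids_len : ∀ (f : Nat), (∀ n vs r rest, metaAKids f n vs = some (r, rest) →
    rest.length ≤ vs.length) := by
  intro f
  induction f with
  | zero =>
    intro n vs r rest h
    cases n with
    | zero =>
      simp only [metaAKids, Option.some.injEq, Prod.mk.injEq] at h
      rw [← h.2]
    | succ n => simp [metaAKids, metaA] at h
  | succ f ih =>
    intro n
    induction n with
    | zero =>
      intro vs r rest h
      simp only [metaAKids, Option.some.injEq, Prod.mk.injEq] at h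
      rw [← h.2]
    | succ n ihn =>
      intro vs r rest h
      simp only [metaAKids] at h
      cases hA : metaA (f + 1) vs with
      | none => simp [hA] at h
      | some p =>
        obtain ⟨r0, vs2⟩ := p
        simp only [hA] at h
        cases hK : metaAKids (f + 1) n vs2 with
        | none => simp [hK] at h
        | some q =>
          obtain ⟨r1, rest1⟩ := q
          simp only [hK, Option.some.injEq, Prod.mk.injEq] at h
          have h2 : vs2.length ≤ vs.length := by
            match vs, hA with
            | [], hA => simp [metaA] at hA
            | [_], hA => simp [metaA] at hA
            | a :: b :: vs', hA =>
              simp only [metaA] at hA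
              cases hk' : metaAKids f a.toNat vs' with
              | none => simp [hk'] at hA
              | some w =>
                obtain ⟨rw, w2⟩ := w
                simp only [hk'] at hA
                cases hpm : popMany b.toNat w2 with
                | none => simp [hpm] at hA
                | some u =>
                  obtain ⟨mu, ru⟩ := u
                  simp only [hpm, Option.some.injEq, Prod.mk.injEq] at hA
                  have h3 := ih a.toNat vs' rw w2 hk'
                  have h4 := popMany_len hpm
                  rw [← hA.2]
                  simp only [List.length_cons]
                  omega
          have h5 := ihn vs2 r1 rest1 hK
          rw [← h.2]
          omega

theorem loopB_mono {f g : Nat} {vs : List Int} {st : List (Int × Int)} {res out : List Int}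
    (h : loopB f vs st res = some out) (hfg : f ≤ g) : loopB g vs st res = some out := by
  induction f generalizing g vs st res out with
  | zero =>
    cases st with
    | nil => cases g <;> simpa [loopB] using h
    | cons a st => simp [loopB] at h
  | succ f ih =>
    cases st with
    | nil => cases g <;> simpa [loopB] using h
    | cons p st =>
      obtain ⟨c, m⟩ := p
      obtain ⟨g, rfl⟩ : ∃ g', g = g' + 1 := ⟨g - 1, by omega⟩
      simp only [loopB] at h ⊢
      by_cases hc : (0 : Int) < c
      · simp only [hc, if_true] at h ⊢
        match vs with
        | [] => simp at h
        | [_] => simp at h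
        | a :: b :: vs' => exact ih h (by omega)
      · simp only [hc, if_false] at h ⊢
        cases hpm : popMany m.toNat vs with
        | none => simp [hpm] at h
        | some u =>
          obtain ⟨mu, ru⟩ := u
          simp only [hpm] at h ⊢
          exact ih h (by omega)

-- the core bridge: A's recursion on one node = B's loop processing that node's frame
theorem frame_bridge : ∀ (f : Nat),
    (∀ (n : Nat) (c m : Int) (vs rk vs1 metas rest : List Int),
      c.toNat = n →
      metaAKids f n vs = some (rk, vs1) →
      popMany m.toNat vs1 = some (metas, rest) →
      ∀ (st : List (Int × Int)) (res out : List Int) (g : Nat),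
        loopB g rest st ((res ++ rk) ++ metas) = some out →
        loopB (g + (vs.length - rest.length) + 1) vs ((c, m) :: st) res = some out) := by
  intro f
  induction f with
  | zero =>
    intro n c m vs rk vs1 metas rest hc hk hpm st res out g hcont
    cases n with
    | succ n => simp [metaAKids, metaA] at hk
    | zero =>
      simp only [metaAKids, Option.some.injEq, Prod.mk.injEq] at hk
      obtain ⟨hk1, hk2⟩ := hk
      subst hk1; subst hk2
      have hc0 : ¬ (0 : Int) < c := by omega
      have hmono : loopB (g + (vs.length - rest.length)) rest st (res ++ metas) = some out :=
        loopB_mono (by simpa using hcont) (by omega)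
      simpa [loopB, hc0, hpm] using hmono
  | succ f ih =>
    intro n
    induction n with
    | zero =>
      intro c m vs rk vs1 metas rest hc hk hpm st res out g hcont
      simp only [metaAKids, Option.some.injEq, Prod.mk.injEq] at hk
      obtain ⟨hk1, hk2⟩ := hk
      subst hk1; subst hk2
      have hc0 : ¬ (0 : Int) < c := by omega
      have hmono : loopB (g + (vs.length - rest.length)) rest st (res ++ metas) = some out :=
        loopB_mono (by simpa using hcont) (by omega)
      simpa [loopB, hc0, hpm] using hmono
    | succ n ihn =>
      intro c m vs rk vs1 metas rest hc hk hpm st res out g hcont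
      have hcpos : (0 : Int) < c := by omega
      simp only [metaAKids] at hk
      cases hA : metaA (f + 1) vs with
      | none => simp [hA] at hk
      | some p =>
        obtain ⟨r0, vs2⟩ := p
        simp only [hA] at hk
        cases hK : metaAKids (f + 1) n vs2 with
        | none => simp [hK] at hk
        | some q =>
          obtain ⟨r1, vs1'⟩ := q
          simp only [hK, Option.some.injEq, Prod.mk.injEq] at hk
          obtain ⟨hrk, hvs1⟩ := hk
          subst hrk; subst hvs1
          match vs, hA with
          | [], hA => simp [metaA] at hA
          | [_], hA => simp [metaA] at hA
          | a :: b :: vs', hA =>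
            simp only [metaA] at hA
            cases hk' : metaAKids f a.toNat vs' with
            | none => simp [hk'] at hA
            | some w =>
              obtain ⟨rw, w2⟩ := w
              simp only [hk'] at hA
              cases hpm' : popMany b.toNat w2 with
              | none => simp [hpm'] at hA
              | some u =>
                obtain ⟨mu, vs2'⟩ := u
                simp only [hpm', Option.some.injEq, Prod.mk.injEq] at hA
                obtain ⟨hr0, hvs2⟩ := hA
                subst hr0; subst hvs2
                have l1 : w2.length ≤ vs'.length := metaAKids_len f a.toNat vs' rw w2 hk'
                have l2 : vs2'.length + b.toNat = w2.length := popMany_len hpm'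
                have l3 : vs1'.length ≤ vs2'.length :=
                  metaAKids_len (f + 1) n vs2' r1 vs1' hK
                have l4 : rest.length + m.toNat = vs1'.length := popMany_len hpm
                have hc1 : (c - 1).toNat = n := by omega
                have step2 := ihn (c - 1) m vs2' r1 vs1' metas rest hc1 hK hpm st
                  (res ++ (rw ++ mu)) out g
                  (by
                    have heq : ((res ++ (rw ++ mu)) ++ r1) ++ metas
                        = (res ++ ((rw ++ mu) ++ r1)) ++ metas := by simp
                    rw [heq]; exact hcont)
                have step1 := ih a.toNat a b vs' rw w2 mu vs2' rfl hk' hpm'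
                  ((c - 1, m) :: st) res out (g + (vs2'.length - rest.length) + 1)
                  (by simpa [List.append_assoc] using step2)
                have hstep : loopB (g + ((a :: b :: vs').length - rest.length) + 1)
                    (a :: b :: vs') ((c, m) :: st) res
                    = loopB (g + ((a :: b :: vs').length - rest.length))
                      vs' ((a, b) :: (c - 1, m) :: st) res := by
                  simp [loopB, hcpos]
                rw [hstep]
                exact loopB_mono step1 (by simp only [List.length_cons]; omega)

-- the checker succeeds → A's parser succeeds with the same unconsumed rest (same fuel)
theorem chk_to_metaA : ∀ (f : Nat) (vs rest : List Int),
    chk f vs = some rest → ∃ r, metaA f vs = some (r, rest) := by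
  intro f
  induction f with
  | zero => intro vs rest h; simp [chk] at h
  | succ f ih =>
    have kids : ∀ (n : Nat) (vs vs' : List Int),
        chkKids (fun w => chk f w) n vs = some vs' →
        ∃ r, metaAKids f n vs = some (r, vs') := by
      intro n
      induction n with
      | zero =>
        intro vs vs' h
        simp only [chkKids, Option.some.injEq] at h
        exact ⟨[], by simp [metaAKids, h]⟩
      | succ n ihn =>
        intro vs vs' h
        simp only [chkKids] at h
        cases hc : chk f vs with
        | none => simp [hc] at h
        | some w =>
          simp only [hc] at h
          obtain ⟨r0, hA⟩ := ih vs w hc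
          obtain ⟨r1, hK⟩ := ihn w vs' h
          exact ⟨r0 ++ r1, by simp [metaAKids, hA, hK]⟩
    intro vs rest h
    match vs with
    | [] => simp [chk] at h
    | [_] => simp [chk] at h
    | c :: m :: vs' =>
      simp only [chk] at h
      cases hf : chkKids (fun w => chk f w) c.toNat vs' with
      | none => simp [hf] at h
      | some w =>
        simp only [hf] at h
        split_ifs at h with hm
        · obtain ⟨r0, hK⟩ := kids c.toNat vs' w hf
          refine ⟨r0 ++ w.take m.toNat, ?_⟩
          simp only [Option.some.injEq] at h
          subst h
          simp [metaA, hK, popMany_take_drop m.toNat w hm]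

-- ===== VERDICT (by name: the statement is the Claim_ definition above) =====
theorem meta_from_spec : Claim_equal_meta_from := by
  intro values _ hpre
  unfold Spec_meta_from
  unfold Pre_meta_from at hpre
  cases hchk : chk (values.length + 1) values with
  | none => rw [hchk] at hpre; simp at hpre
  | some rest =>
    obtain ⟨r, hA⟩ := chk_to_metaA _ _ _ hchk
    have hmf : meta_from values = r := by simp [meta_from, hA]
    match values, hA with
    | [], hA => simp [metaA] at hA
    | [_], hA => simp [metaA] at hA
    | c :: m :: vs, hA =>
      simp only [List.length_cons, metaA] at hA
      cases hk : metaAKids (vs.length + 1 + 1) c.toNat vs with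
      | none => simp [hk] at hA
      | some p =>
        obtain ⟨rk, vs1⟩ := p
        simp only [hk] at hA
        cases hpm : popMany m.toNat vs1 with
        | none => simp [hpm] at hA
        | some u =>
          obtain ⟨metas, rest'⟩ := u
          simp only [hpm, Option.some.injEq, Prod.mk.injEq] at hA
          obtain ⟨hr, hrest⟩ := hA
          have hbase : loopB 0 rest' [] (([] ++ rk) ++ metas) = some ((rk) ++ metas) := by
            simp [loopB]
          have hbr := frame_bridge (vs.length + 1 + 1) c.toNat c m vs rk vs1 metas rest'
            rfl hk hpm [] [] (rk ++ metas) 0 hbase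
          have hlen : rest'.length ≤ vs.length := by
            have := metaAKids_len (vs.length + 1 + 1) c.toNat vs rk vs1 hk
            have := popMany_len hpm
            omega
          have hfin : loopB (vs.length + 2) vs [(c, m)] [] = some (rk ++ metas) :=
            loopB_mono hbr (by omega)
          simp only [meta_from_alt, hfin, Option.getD_some]
          rw [hmf, ← hr]
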